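-- pv_equiv track=rewrite | github.com/microsoft/UFO | ufo/galaxy/constellation/parsers/constellation_updater.py | _parse_llm_update_instructions
-- ===== SOURCE A (Python) =====
-- from typing import Any, Dict, List, Optional, Set
--
-- def _parse_llm_update_instructions(llm_output: str) -> List[Dict[str, Any]]:
--     """
--     Parse LLM output for update instructions.
--
--     Args:
--         llm_output: Raw LLM response
--
--     Returns:
--         List of parsed update instructions
--     """
--     # This is a simplified parser - in practice, this would be more sophisticated
--     instructions = []
--
--     # Look for common update patterns
--     lines = llm_output.strip().split("\n")
--     current_instruction = None
--
--     for line in lines: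
--         line = line.strip()
--
--         if line.startswith("ADD TASK:"):
--             if current_instruction:
--                 instructions.append(current_instruction)
--             current_instruction = {
--                 "type": "add_task",
--                 "description": line.replace("ADD TASK:", "").strip(),
--             }
--         elif line.startswith("REMOVE TASK:"):
--             if current_instruction:
--                 instructions.append(current_instruction)
--             current_instruction = {
--                 "type": "remove_task",
--                 "task_id": line.replace("REMOVE TASK:", "").strip(),
--             }
--         elif line.startswith("ADD DEPENDENCY:"):
--             if current_instruction:
--                 instructions.append(current_instruction)
--             current_instruction = {
--                 "type": "add_dependency",
--                 "spec": line.replace("ADD DEPENDENCY:", "").strip(),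
--             }
--
--     if current_instruction:
--         instructions.append(current_instruction)
--
--     return instructions
-- ===== SOURCE B (Python) =====
-- _TABLE = [
--     ("ADD TASK:", "add_task", "description"),
--     ("REMOVE TASK:", "remove_task", "task_id"),
--     ("ADD DEPENDENCY:", "add_dependency", "spec"),
-- ]
--
--
-- def _parse_llm_update_instructions(llm_output: str):
--     # Staged passes: one full scan of the lines PER prefix, tagging each hit
--     # with its line number; a final sort by line number restores document
--     # order. Correct because the three prefixes are mutually exclusive, so a
--     # line is tagged at most once.
--     lines = [l.strip() for l in llm_output.strip().split("\n")]
--     tagged = []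
--     for prefix, typ, key in _TABLE:
--         for i, line in enumerate(lines):
--             if line.startswith(prefix):
--                 tagged.append((i, {"type": typ, key: line.replace(prefix, "").strip()}))
--     tagged.sort(key=lambda t: t[0])
--     return [instr for _, instr in tagged]
-- ===== Notes on version B (the rewrite author's own statement) =====
-- stated objective: alternative
-- what changed: Replaced A's single-pass current_instruction state machine (with its deferred end-of-loop flush) by staged passes: one full scan of the lines per prefix collects (line-index, instruction) pairs, and a final sort by line index merges the three result streams back into document order; correctness rests on the three prefixes being mutually exclusive.
import Mathlib
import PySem

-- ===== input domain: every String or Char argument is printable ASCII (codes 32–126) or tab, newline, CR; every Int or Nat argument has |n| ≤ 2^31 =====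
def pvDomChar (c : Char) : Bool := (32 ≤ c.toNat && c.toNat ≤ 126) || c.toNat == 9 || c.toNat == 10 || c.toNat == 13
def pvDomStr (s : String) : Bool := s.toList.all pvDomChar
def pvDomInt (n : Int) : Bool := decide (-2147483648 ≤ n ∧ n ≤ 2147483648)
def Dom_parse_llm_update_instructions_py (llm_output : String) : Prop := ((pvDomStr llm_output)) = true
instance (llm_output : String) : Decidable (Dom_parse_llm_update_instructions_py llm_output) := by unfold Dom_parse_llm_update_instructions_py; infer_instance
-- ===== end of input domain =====

-- B replaces A's single-pass current_instruction state machine (deferred flush) by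
-- staged passes: one scan of the lines per prefix tags hits with their line index,
-- and a final sort by index merges the streams; objective: alternative algorithm.


-- ===== PORT A =====
def pvStepA (st : List (List (String × String)) × Option (List (String × String)))
    (line0 : List Char) : List (List (String × String)) × Option (List (String × String)) :=
  let line := PySem.Chars.strip line0
  if PySem.Chars.startswith line "ADD TASK:".toList then
    (st.1 ++ st.2.toList,
     some [("type", "add_task"),
           ("description", String.ofList (PySem.Chars.strip (PySem.Chars.replace line "ADD TASK:".toList [])))])
  else if PySem.Chars.startswith line "REMOVE TASK:".toList then
    (st.1 ++ st.2.toList,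
     some [("type", "remove_task"),
           ("task_id", String.ofList (PySem.Chars.strip (PySem.Chars.replace line "REMOVE TASK:".toList [])))])
  else if PySem.Chars.startswith line "ADD DEPENDENCY:".toList then
    (st.1 ++ st.2.toList,
     some [("type", "add_dependency"),
           ("spec", String.ofList (PySem.Chars.strip (PySem.Chars.replace line "ADD DEPENDENCY:".toList [])))])
  else st

def parse_llm_update_instructions_py (llm_output : String) : List (List (String × String)) :=
  let lines := PySem.Chars.splitOn (PySem.Chars.strip llm_output.toList) ['\n']
  let st := lines.foldl pvStepA ([], none)
  st.1 ++ st.2.toList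

-- ===== PORT B =====
def pvTableB : List (String × String × String) :=
  [("ADD TASK:", "add_task", "description"),
   ("REMOVE TASK:", "remove_task", "task_id"),
   ("ADD DEPENDENCY:", "add_dependency", "spec")]

def pvInstrB (e : String × String × String) (line : List Char) : List (String × String) :=
  [("type", e.2.1),
   (e.2.2, String.ofList (PySem.Chars.strip (PySem.Chars.replace line e.1.toList [])))]

def parse_llm_update_instructions_py_alt (llm_output : String) : List (List (String × String)) :=
  let lines := (PySem.Chars.splitOn (PySem.Chars.strip llm_output.toList) ['\n']).map PySem.Chars.strip
  let tagged := pvTableB.flatMap (fun e =>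
    ((PySem.List.enumerate lines).filter (fun p => PySem.Chars.startswith p.2 e.1.toList)).map
      (fun p => (p.1, pvInstrB e p.2)))
  (PySem.List.sorted tagged (fun t => t.1) false).map (fun t => t.2)

-- ===== PRECONDITION & SPEC =====
def Spec_parse_llm_update_instructions_py (llm_output : String) (out : List (List (String × String))) : Prop := out = parse_llm_update_instructions_py_alt llm_output
instance (llm_output : String) (out : List (List (String × String))) : Decidable (Spec_parse_llm_update_instructions_py llm_output out) := by unfold Spec_parse_llm_update_instructions_py; infer_instance

-- ===== CLAIM (what is proved, stated in full; the proofs are below) =====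
def Claim_equal_parse_llm_update_instructions_py : Prop := ∀ (llm_output : String), Dom_parse_llm_update_instructions_py llm_output → Spec_parse_llm_update_instructions_py llm_output (parse_llm_update_instructions_py llm_output)

-- ===== LEMMAS AND PROOFS =====

-- Per-line first-match lookup, the common reference point of both proofs.
def pvMatch (line : List Char) : Option (List (String × String)) :=
  (pvTableB.find? (fun e => PySem.Chars.startswith line e.1.toList)).map
    (fun e => pvInstrB e line)

-- Two incomparable lists cannot both be prefixes of the same list.
theorem pv_prefix_excl {p q l : List Char} (hpq : ¬ p <+: q) (hqp : ¬ q <+: p)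
    (h : PySem.Chars.startswith l p = true) : PySem.Chars.startswith l q = false := by
  rw [PySem.Chars.startswith_iff] at h
  by_contra hb
  rw [Bool.not_eq_false, PySem.Chars.startswith_iff] at hb
  rcases List.prefix_or_prefix_of_prefix h hb with h' | h'
  · exact hpq h'
  · exact hqp h'

-- A's one step, expressed through the per-line lookup.
theorem pvStepA_eq_match (st : List (List (String × String)) × Option (List (String × String)))
    (l : List Char) :
    pvStepA st l =
      match pvMatch (PySem.Chars.strip l) with
      | some i => (st.1 ++ st.2.toList, some i)
      | none => st := by
  unfold pvStepA pvMatch pvTableB pvInstrB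
  simp only [List.find?]
  split_ifs with h1 h2 h3 <;> simp_all

-- A-side loop invariant: flushing the fold state yields the accumulator, the
-- pending instruction, then the per-line lookup over the remaining lines.
theorem pvFold_eq (lines : List (List Char))
    (ins : List (List (String × String))) (cur : Option (List (String × String))) :
    (lines.foldl pvStepA (ins, cur)).1 ++ (lines.foldl pvStepA (ins, cur)).2.toList =
      ins ++ cur.toList ++ lines.filterMap (fun raw => pvMatch (PySem.Chars.strip raw)) := by
  induction lines generalizing ins cur with
  | nil => simp
  | cons l rest ih =>
    simp only [List.foldl_cons, List.filterMap_cons, pvStepA_eq_match (ins, cur) l]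
    cases h : pvMatch (PySem.Chars.strip l) with
    | none => simp [ih]
    | some i => simp [ih, List.append_assoc]

-- The tagged per-line lookup over enumerated lines.
def pvTagged (L : List (Int × List Char)) : List (Int × List (String × String)) :=
  L.filterMap (fun p => (pvMatch p.2).map (fun i => (p.1, i)))

-- Moving one element out of a three-way concatenation.
theorem pv_perm_mid {α : Type} (x : α) (A B C : List α) :
    (A ++ (x :: B ++ C)).Perm (x :: (A ++ (B ++ C))) := by
  simpa using List.perm_middle (a := x) (l₁ := A) (l₂ := B ++ C)

theorem pv_perm_last {α : Type} (x : α) (A B C : List α) :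
    (A ++ (B ++ x :: C)).Perm (x :: (A ++ (B ++ C))) := by
  simpa [List.append_assoc] using List.perm_middle (a := x) (l₁ := A ++ B) (l₂ := C)

-- B's three staged passes are a permutation of the single tagged lookup pass
-- (the prefixes are mutually exclusive, so each line is tagged at most once).
theorem pvFlatMap_perm (L : List (Int × List Char)) :
    (pvTableB.flatMap (fun e =>
      (L.filter (fun p => PySem.Chars.startswith p.2 e.1.toList)).map
        (fun p => (p.1, pvInstrB e p.2)))).Perm (pvTagged L) := by
  induction L with
  | nil => simp [pvTableB, pvTagged]
  | cons p t ih =>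
    simp only [pvTableB, List.flatMap_cons, List.flatMap_nil, List.append_nil] at ih ⊢
    simp only [pvTagged, List.filterMap_cons] at ih ⊢
    by_cases h1 : PySem.Chars.startswith p.2 "ADD TASK:".toList = true
    · have h2 := pv_prefix_excl (p := "ADD TASK:".toList) (q := "REMOVE TASK:".toList)
        (by decide) (by decide) h1
      have h3 := pv_prefix_excl (p := "ADD TASK:".toList) (q := "ADD DEPENDENCY:".toList)
        (by decide) (by decide) h1
      simp only [pvMatch, pvTableB, List.find?, h1, h2, h3, List.filter_cons, List.map_cons,
        cond_true, cond_false, Option.map_some, List.cons_append]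
      exact ih.cons _
    · have h1' : PySem.Chars.startswith p.2 "ADD TASK:".toList = false := by
        simpa using h1
      by_cases h2 : PySem.Chars.startswith p.2 "REMOVE TASK:".toList = true
      · have h3 := pv_prefix_excl (p := "REMOVE TASK:".toList) (q := "ADD DEPENDENCY:".toList)
          (by decide) (by decide) h2
        simp only [pvMatch, pvTableB, List.find?, h1', h2, h3, List.filter_cons,
          List.map_cons, cond_true, cond_false, Option.map_some]
        exact (pv_perm_mid _ _ _ _).trans (ih.cons _)
      · have h2' : PySem.Chars.startswith p.2 "REMOVE TASK:".toList = false := by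
          simpa using h2
        by_cases h3 : PySem.Chars.startswith p.2 "ADD DEPENDENCY:".toList = true
        · simp only [pvMatch, pvTableB, List.find?, h1', h2', h3, List.filter_cons,
            List.map_cons, cond_true, cond_false, Option.map_some]
          exact (pv_perm_last _ _ _ _).trans (ih.cons _)
        · have h3' : PySem.Chars.startswith p.2 "ADD DEPENDENCY:".toList = false := by
            simpa using h3
          simp only [pvMatch, pvTableB, List.find?, h1', h2', h3', List.filter_cons,
            cond_false, Option.map_none]
          exact ih

-- The tagged pass over an enumeration has strictly increasing indices.
theorem pvTagged_pairwise (lines : List (List Char)) :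
    (pvTagged (PySem.List.enumerate lines)).Pairwise (fun a b => a.1 < b.1) := by
  refine List.Pairwise.filterMap _ ?_ (PySem.List.pairwise_lt_enumerate (xs := lines) (s := 0))
  intro a b hab x hx y hy
  cases ha : pvMatch a.2 with
  | none => simp [ha] at hx
  | some v =>
    cases hb : pvMatch b.2 with
    | none => simp [hb] at hy
    | some w =>
      simp only [ha, Option.map_some, Option.mem_def, Option.some_inj] at hx
      simp only [hb, Option.map_some, Option.mem_def, Option.some_inj] at hy
      rw [← hx, ← hy]
      exact hab

-- Dropping the tags from the tagged pass gives the per-line lookup.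
theorem pvTagged_map_snd (L : List (Int × List Char)) :
    (pvTagged L).map (fun t => t.2) = (L.map (fun p => p.2)).filterMap pvMatch := by
  induction L with
  | nil => rfl
  | cons p t ih =>
    simp only [pvTagged, List.filterMap_cons, List.map_cons] at ih ⊢
    cases h : pvMatch p.2 <;> simp [ih, pvTagged]

-- ===== VERDICT (by name: the statement is the Claim_ definition above) =====
theorem parse_llm_update_instructions_py_spec : Claim_equal_parse_llm_update_instructions_py := by
  intro s _
  unfold Spec_parse_llm_update_instructions_py parse_llm_update_instructions_py
    parse_llm_update_instructions_py_alt
  have hA := pvFold_eq (PySem.Chars.splitOn (PySem.Chars.strip s.toList) ['\n']) [] none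
  set lines := (PySem.Chars.splitOn (PySem.Chars.strip s.toList) ['\n']).map PySem.Chars.strip with hl
  have hsorted :
      PySem.List.sorted (pvTableB.flatMap (fun e =>
        ((PySem.List.enumerate lines).filter (fun p => PySem.Chars.startswith p.2 e.1.toList)).map
          (fun p => (p.1, pvInstrB e p.2)))) (fun t => t.1) false =
        pvTagged (PySem.List.enumerate lines) :=
    PySem.List.sorted_eq_of_perm_of_pairwise_lt _ _ _
      ((pvFlatMap_perm (PySem.List.enumerate lines)).symm) (pvTagged_pairwise lines)
  simp only [hsorted, pvTagged_map_snd, PySem.List.map_snd_enumerate]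
  rw [hl, List.filterMap_map]
  simpa [Function.comp] using hA
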